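-- pv_equiv track=rewrite | github.com/JHoffman-Grandstream/temp | convert.py | find_highest_mana_card_of_color
-- ===== SOURCE A (Python) =====
-- def get_mana_value(mana_cost):
--     """Calculate the total mana value from a mana cost string, accounting for both numeric and color symbols."""
--     mana_value = 0
--     numeric_value = ''
--     for char in mana_cost:
--         if char.isdigit():
--             numeric_value += char  # Accumulate digit characters
--         else:
--             if numeric_value:
--                 mana_value += int(numeric_value)  # Convert accumulated digits to int and add to total
--                 numeric_value = ''  # Reset for next number
--             if char.isalpha():
--                 mana_value += 1  # Count each color symbol as 1
--
--     if numeric_value: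
--         mana_value += int(numeric_value)  # Handle any remaining number at the end
--
--     return mana_value
--
-- def find_highest_mana_card_of_color(lotr_cards, colors):
--     """Find the card with the highest mana cost that matches the given colors."""
--     best_card = None
--     highest_mana_value = -1
--     for card in lotr_cards:
--         if all(color in card.get('manaCost', '') for color in colors):
--             mana_value = get_mana_value(card['manaCost'])
--             if mana_value > highest_mana_value:
--                 highest_mana_value = mana_value
--                 best_card = card
--     return best_card
-- ===== SOURCE B (Python) =====
-- def get_mana_value(mana_cost):
--     """Tokenizing scan: each step consumes a whole maximal digit run (via an index
--     jump) or a single symbol, so there is no flush-on-separator accumulator state."""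
--     total = 0
--     i = 0
--     n = len(mana_cost)
--     while i < n:
--         if mana_cost[i].isdigit():
--             j = i + 1
--             while j < n and mana_cost[j].isdigit():
--                 j += 1
--             total += int(mana_cost[i:j])
--             i = j
--         else:
--             if mana_cost[i].isalpha():
--                 total += 1
--             i += 1
--     return total
--
--
-- def find_highest_mana_card_of_color(lotr_cards, colors):
--     """Find the card with the highest mana cost that matches the given colors."""
--     matching = [card for card in lotr_cards
--                 if all(color in card.get('manaCost', '') for color in colors)]
--     return max(matching, key=lambda card: get_mana_value(card['manaCost']),
--                default=None)
-- ===== Notes on version B (the rewrite author's own statement) =====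
-- stated objective: idiomatic
-- what changed: get_mana_value is rewritten as a digit-run tokenizer (each step consumes a whole maximal digit run or one symbol) instead of the stateful flush-on-separator accumulator loop, and the outer max-tracking loop with a -1 sentinel becomes filter + max(key=..., default=None), which keeps first-wins tie-breaking.
import Mathlib
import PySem

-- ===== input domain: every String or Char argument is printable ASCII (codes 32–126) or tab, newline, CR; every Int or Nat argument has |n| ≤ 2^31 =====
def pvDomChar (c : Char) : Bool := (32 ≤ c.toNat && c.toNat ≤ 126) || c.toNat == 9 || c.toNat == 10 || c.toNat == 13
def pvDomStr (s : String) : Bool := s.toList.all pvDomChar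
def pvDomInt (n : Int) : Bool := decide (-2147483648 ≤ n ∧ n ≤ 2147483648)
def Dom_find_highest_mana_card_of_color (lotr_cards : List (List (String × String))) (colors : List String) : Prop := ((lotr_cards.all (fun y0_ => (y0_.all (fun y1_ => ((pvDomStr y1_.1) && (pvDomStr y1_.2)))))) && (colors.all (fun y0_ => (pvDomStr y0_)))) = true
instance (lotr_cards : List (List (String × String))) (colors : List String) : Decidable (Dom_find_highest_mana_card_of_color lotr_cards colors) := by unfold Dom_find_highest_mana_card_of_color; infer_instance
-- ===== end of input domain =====

-- B replaces A's flush-on-separator accumulator loop by a digit-run tokenizer and A's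
-- max-tracking loop by filter + max(key=…, default=None) (objective: idiomatic, not faster).

-- shared helper: card.get(key, dflt) on a dict given as an association list (first match)
def dictGetD (card : List (String × String)) (key dflt : String) : String :=
  match card.find? (fun p => p.1 == key) with
  | some p => p.2
  | none => dflt

-- ===== PORT A =====
-- numeric_value is represented by its character list; int(numeric_value) is
-- PySem.Int.ofChars? (numeric_value is always a nonempty digit run, so int() never raises
-- and the .getD 0 default is never taken).
def get_mana_value (mana_cost : String) : Int :=
  let st := mana_cost.toList.foldl (fun (st : Int × List Char) c =>
    if PySem.Chars.isdigit c then
      (st.1, st.2 ++ [c])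
    else
      let st1 := if st.2 ≠ [] then (st.1 + (PySem.Int.ofChars? st.2).getD 0, ([] : List Char)) else st
      if PySem.Chars.isalpha c then (st1.1 + 1, st1.2) else st1)
    ((0 : Int), ([] : List Char))
  if st.2 ≠ [] then st.1 + (PySem.Int.ofChars? st.2).getD 0 else st.1

-- card['manaCost'] is written dictGetD card "manaCost" "": Pre_ guarantees the key is
-- present on every matching card, so the "" default is never taken (Python raises KeyError there).
def find_highest_mana_card_of_color (lotr_cards : List (List (String × String))) (colors : List String) : Option (List (String × String)) :=
  let st := lotr_cards.foldl (fun (st : Option (List (String × String)) × Int) card =>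
    if colors.all (fun color => PySem.Str.isIn color (dictGetD card "manaCost" "")) then
      let mana_value := get_mana_value (dictGetD card "manaCost" "")
      if mana_value > st.2 then (some card, mana_value) else st
    else st) (none, (-1 : Int))
  st.1

-- ===== PORT B =====
-- tokenizer: each step consumes a whole maximal digit run (the inner while-loop over j is
-- the takeWhile/dropWhile split) or a single symbol
def gmvTok : List Char → Int
  | [] => 0
  | c :: cs =>
    if PySem.Chars.isdigit c then
      (PySem.Int.ofChars? (c :: cs.takeWhile PySem.Chars.isdigit)).getD 0
        + gmvTok (cs.dropWhile PySem.Chars.isdigit)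
    else
      (if PySem.Chars.isalpha c then 1 else 0) + gmvTok cs
termination_by l => l.length
decreasing_by
  · exact Nat.lt_succ_of_le (List.length_dropWhile_le _ _)
  · exact Nat.lt_succ_of_le (Nat.le_refl _)

def get_mana_value_alt (mana_cost : String) : Int := gmvTok mana_cost.toList

def find_highest_mana_card_of_color_alt (lotr_cards : List (List (String × String))) (colors : List String) : Option (List (String × String)) :=
  let matching := lotr_cards.filter (fun card =>
    colors.all (fun color => PySem.Str.isIn color (dictGetD card "manaCost" "")))
  PySem.List.max? matching (fun card => get_mana_value_alt (dictGetD card "manaCost" ""))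

-- ===== PRECONDITION & SPEC =====
-- Pre_ excludes inputs where a card matching all colors lacks the 'manaCost' key:
-- there Python A (and B) raise KeyError on card['manaCost'].
def Pre_find_highest_mana_card_of_color (lotr_cards : List (List (String × String))) (colors : List String) : Prop :=
  ∀ card ∈ lotr_cards,
    (colors.all (fun color => PySem.Str.isIn color (dictGetD card "manaCost" "")) = true) →
    (card.find? (fun p => p.1 == "manaCost")).isSome = true
instance (lotr_cards : List (List (String × String))) (colors : List String) : Decidable (Pre_find_highest_mana_card_of_color lotr_cards colors) := by unfold Pre_find_highest_mana_card_of_color; infer_instance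

def pvWitness_find_highest_mana_card_of_color : (List (List (String × String))) × List String :=
  ([[("name", "Gandalf"), ("manaCost", "{2}{W}{W}")], [("manaCost", "{10}{U}")]], ["W"])

def Spec_find_highest_mana_card_of_color (lotr_cards : List (List (String × String))) (colors : List String) (out : Option (List (String × String))) : Prop := out = find_highest_mana_card_of_color_alt lotr_cards colors
instance (lotr_cards : List (List (String × String))) (colors : List String) (out : Option (List (String × String))) : Decidable (Spec_find_highest_mana_card_of_color lotr_cards colors out) := by unfold Spec_find_highest_mana_card_of_color; infer_instance

-- ===== CLAIM (what is proved, stated in full; the proofs are below) =====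
def Claim_equal_find_highest_mana_card_of_color : Prop := ∀ (lotr_cards : List (List (String × String))) (colors : List String), Dom_find_highest_mana_card_of_color lotr_cards colors → Pre_find_highest_mana_card_of_color lotr_cards colors → Spec_find_highest_mana_card_of_color lotr_cards colors (find_highest_mana_card_of_color lotr_cards colors)

-- ===== LEMMAS AND PROOFS =====

theorem digit_not_space {c : Char} (h : PySem.Chars.isdigit c = true) : PySem.Int.isIntSpace c = false := by
  simp only [PySem.Int.isIntSpace, Bool.or_eq_false_iff, decide_eq_false_iff_not]
  refine ⟨⟨⟨⟨⟨?_,?_⟩,?_⟩,?_⟩,?_⟩,?_⟩ <;> · rintro rfl; exact absurd h (by decide)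

theorem opt_nat_helper (o : Option Nat) : 0 ≤ ((Option.map (fun n => n) (o.bind fun a => pure ((a : Int)))).getD 0) := by
  cases o <;> simp

theorem ofChars_digits_nonneg (l : List Char) (h : ∀ c ∈ l, PySem.Chars.isdigit c = true) :
    0 ≤ (PySem.Int.ofChars? l).getD 0 := by
  have hds : ∀ (m : List Char), (∀ c ∈ m, PySem.Chars.isdigit c = true) → List.dropWhile PySem.Int.isIntSpace m = m := by
    intro m hm
    cases m with
    | nil => rfl
    | cons a t => simp [List.dropWhile, digit_not_space (hm a (by simp))]
  unfold PySem.Int.ofChars?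
  rw [hds l h, hds l.reverse (by intro c hc; exact h c (List.mem_reverse.mp hc)), List.reverse_reverse]
  dsimp only
  split
  · exact absurd (h '-' (by simp)) (by decide)
  · exact absurd (h '+' (by simp)) (by decide)
  · exact opt_nat_helper _

theorem gmvTok_nonneg (l : List Char) : 0 ≤ gmvTok l := by
  induction l using gmvTok.induct with
  | case1 => simp [gmvTok]
  | case2 c cs hd ih =>
    rw [gmvTok, if_pos hd]
    have h1 : 0 ≤ (PySem.Int.ofChars? (c :: cs.takeWhile PySem.Chars.isdigit)).getD 0 := by
      refine ofChars_digits_nonneg _ ?_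
      intro x hx
      rcases List.mem_cons.mp hx with rfl | hx
      · exact hd
      · exact List.mem_takeWhile_imp hx
    omega
  | case3 c cs hd ih =>
    rw [gmvTok, if_neg hd]
    split <;> omega

theorem gmvTok_digits (nv : List Char) (h : ∀ c ∈ nv, PySem.Chars.isdigit c = true) :
    gmvTok nv = if nv ≠ [] then (PySem.Int.ofChars? nv).getD 0 else 0 := by
  cases nv with
  | nil => simp [gmvTok]
  | cons d ds =>
    have hd := h d (by simp)
    have hds : ∀ c ∈ ds, PySem.Chars.isdigit c = true := fun c hc => h c (by simp [hc])
    rw [gmvTok, if_pos hd]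
    rw [List.takeWhile_eq_self_iff.mpr hds, List.dropWhile_eq_nil_iff.mpr hds]
    simp [gmvTok]

theorem gmvTok_digits_append (nv : List Char) (c : Char) (cs : List Char)
    (h : ∀ x ∈ nv, PySem.Chars.isdigit x = true) (hc : PySem.Chars.isdigit c = false) :
    gmvTok (nv ++ c :: cs) = (if nv ≠ [] then (PySem.Int.ofChars? nv).getD 0 else 0) + gmvTok (c :: cs) := by
  cases nv with
  | nil => simp
  | cons d ds =>
    have hd := h d (by simp)
    have hds : ∀ x ∈ ds, PySem.Chars.isdigit x = true := fun x hx => h x (by simp [hx])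
    have htw : (ds ++ c :: cs).takeWhile PySem.Chars.isdigit = ds := by
      rw [List.takeWhile_append, List.takeWhile_eq_self_iff.mpr hds]
      simp [List.takeWhile, hc]
    have hdw : (ds ++ c :: cs).dropWhile PySem.Chars.isdigit = c :: cs := by
      rw [List.dropWhile_append, List.dropWhile_eq_nil_iff.mpr hds]
      simp [List.dropWhile, hc]
    rw [List.cons_append, gmvTok, if_pos hd, htw, hdw]
    simp

-- A's accumulator loop, flushed at the end, computes B's tokenizer value
theorem gmv_loop_eq (cs : List Char) : ∀ (t : Int) (nv : List Char),
    (∀ x ∈ nv, PySem.Chars.isdigit x = true) →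
    (let st := cs.foldl (fun (st : Int × List Char) c =>
        if PySem.Chars.isdigit c then
          (st.1, st.2 ++ [c])
        else
          let st1 := if st.2 ≠ [] then (st.1 + (PySem.Int.ofChars? st.2).getD 0, ([] : List Char)) else st
          if PySem.Chars.isalpha c then (st1.1 + 1, st1.2) else st1) (t, nv)
      if st.2 ≠ [] then st.1 + (PySem.Int.ofChars? st.2).getD 0 else st.1)
    = t + gmvTok (nv ++ cs) := by
  induction cs with
  | nil =>
    intro t nv hnv
    simp only [List.foldl_nil, List.append_nil]
    rw [gmvTok_digits nv hnv]
    split <;> simp_all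
  | cons c cs ih =>
    intro t nv hnv
    simp only [List.foldl_cons]
    by_cases hd : PySem.Chars.isdigit c = true
    · simp only [hd, if_true]
      have hnv' : ∀ x ∈ nv ++ [c], PySem.Chars.isdigit x = true := by
        intro x hx
        rcases List.mem_append.mp hx with h1 | h1
        · exact hnv x h1
        · simp only [List.mem_singleton] at h1; subst h1; exact hd
      rw [show nv ++ c :: cs = (nv ++ [c]) ++ cs from by simp]
      exact ih t (nv ++ [c]) hnv'
    · have hd' : PySem.Chars.isdigit c = false := eq_false_of_ne_true hd
      simp only [hd', Bool.false_eq_true, if_false]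
      rw [gmvTok_digits_append nv c cs hnv hd']
      rw [show gmvTok (c :: cs) = (if PySem.Chars.isalpha c then 1 else 0) + gmvTok cs from by
        rw [gmvTok]; rw [if_neg (by simp [hd'])]]
      by_cases hnv0 : nv = []
      · subst hnv0
        simp only [ne_eq, not_true_eq_false, if_false]
        by_cases ha : PySem.Chars.isalpha c = true
        · simp only [ha, if_true]
          rw [ih (t + 1) [] (by simp)]
          simp only [List.nil_append]
          omega
        · have ha' : PySem.Chars.isalpha c = false := eq_false_of_ne_true ha
          simp only [ha', Bool.false_eq_true, if_false]
          rw [ih t [] (by simp)]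
          simp only [List.nil_append]
          omega
      · simp only [ne_eq, hnv0, not_false_eq_true, if_true]
        by_cases ha : PySem.Chars.isalpha c = true
        · simp only [ha, if_true]
          rw [ih (t + (PySem.Int.ofChars? nv).getD 0 + 1) [] (by simp)]
          simp only [List.nil_append]
          omega
        · have ha' : PySem.Chars.isalpha c = false := eq_false_of_ne_true ha
          simp only [ha', Bool.false_eq_true, if_false]
          rw [ih (t + (PySem.Int.ofChars? nv).getD 0) [] (by simp)]
          simp only [List.nil_append]
          omega

theorem gmv_eq (s : String) : get_mana_value s = get_mana_value_alt s := by
  have := gmv_loop_eq s.toList 0 [] (by simp)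
  simpa [get_mana_value, get_mana_value_alt] using this

-- the running strict-max loop, once seeded, computes the first maximal element
theorem max_loop_eq {α : Type} (key : α → Int) (m : List α) : ∀ (b : α),
    m.foldl (fun (st : Option α × Int) x => if key x > st.2 then (some x, key x) else st) (some b, key b)
    = (some (m.foldl (fun b x => if key b < key x then x else b) b),
       key (m.foldl (fun b x => if key b < key x then x else b) b)) := by
  induction m with
  | nil => intro b; rfl
  | cons x m ih =>
    intro b
    simp only [List.foldl_cons]
    by_cases h : key b < key x
    · rw [if_pos (show key x > key b from h), if_pos h]
      exact ih x
    · rw [if_neg (show ¬ key x > key b from h), if_neg h]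
      exact ih b

theorem max?_seed {α : Type} (key : α → Int) : ∀ (m : List α) (b : α),
    PySem.List.max? (b :: m) key
    = some (m.foldl (fun b x => if key b < key x then x else b) b) := by
  intro m
  induction m with
  | nil => intro b; rfl
  | cons x m ih =>
    intro b
    have h1 : PySem.List.max? (b :: x :: m) key
        = PySem.List.max? ((if key b < key x then x else b) :: m) key := by
      simp only [PySem.List.max?, List.foldl_cons]
      by_cases h : key b < key x <;> simp [h]
    rw [h1, ih]
    simp only [List.foldl_cons]

theorem strict_max_eq_max? {α : Type} (key : α → Int) (hkey : ∀ x, 0 ≤ key x) (m : List α) :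
    (m.foldl (fun (st : Option α × Int) x => if key x > st.2 then (some x, key x) else st)
      (none, (-1 : Int))).1 = PySem.List.max? m key := by
  cases m with
  | nil => rfl
  | cons c m =>
    simp only [List.foldl_cons]
    have h0 : key c > (-1 : Int) := lt_of_lt_of_le (by norm_num) (hkey c)
    rw [if_pos h0]
    rw [show List.foldl (fun (st : Option α × Int) x => if key x > st.2 then (some x, key x) else st) (some c, key c) m
          = (some (m.foldl (fun b x => if key b < key x then x else b) c),
             key (m.foldl (fun b x => if key b < key x then x else b) c)) from max_loop_eq key m c]
    rw [max?_seed key m c]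

-- ===== VERDICT (by name: the statement is the Claim_ definition above) =====
theorem find_highest_mana_card_of_color_spec : Claim_equal_find_highest_mana_card_of_color := by
  intro lotr_cards colors _hDom _hPre
  unfold Spec_find_highest_mana_card_of_color
  unfold find_highest_mana_card_of_color find_highest_mana_card_of_color_alt
  simp only
  rw [← List.foldl_filter]
  have hk : ∀ card : List (String × String),
      get_mana_value (dictGetD card "manaCost" "") = get_mana_value_alt (dictGetD card "manaCost" "") :=
    fun card => gmv_eq _
  have hnn : ∀ card : List (String × String),
      0 ≤ get_mana_value_alt (dictGetD card "manaCost" "") :=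
    fun card => gmvTok_nonneg _
  calc _ = (List.foldl (fun (st : Option (List (String × String)) × Int) card =>
            if get_mana_value_alt (dictGetD card "manaCost" "") > st.2
            then (some card, get_mana_value_alt (dictGetD card "manaCost" "")) else st)
            (none, (-1 : Int))
            (lotr_cards.filter (fun card =>
              colors.all (fun color => PySem.Str.isIn color (dictGetD card "manaCost" ""))))).1 := by
          simp only [hk]
    _ = _ := strict_max_eq_max? _ hnn _
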